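-- pv_equiv track=rewrite | github.com/promptdriven/pdd | pdd/ci_validation.py | _classify_check_result
-- ===== SOURCE A (Python) =====
-- from typing import Any, Callable, Dict, List, Optional, Tuple
--
-- PASS_BUCKETS = {"pass", "skipping"}
--
-- FAIL_BUCKETS = {"fail", "cancel"}
--
-- PENDING_BUCKETS = {"pending"}
--
-- def _classify_check_result(returncode: int, checks: List[Dict[str, str]]) -> str:
--     """Classify `gh pr checks` output using both exit code and bucket values."""
--     buckets = [check.get("bucket", "").lower() for check in checks if check.get("bucket")]
--
--     if any(bucket in FAIL_BUCKETS for bucket in buckets):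
--         return "failed"
--     if checks and all(bucket in PASS_BUCKETS for bucket in buckets):
--         return "passed"
--     if any(bucket in PENDING_BUCKETS for bucket in buckets):
--         return "pending"
--
--     if returncode == 0:
--         return "passed"
--     if returncode == 1:
--         return "failed"
--     return "pending"
-- ===== SOURCE B (Python) =====
-- PASS_BUCKETS = {"pass", "skipping"}
-- FAIL_BUCKETS = {"fail", "cancel"}
-- PENDING_BUCKETS = {"pending"}
--
-- # Severity lattice: each bucket maps to a numeric rank and the whole run is
-- # classified from the single MAX rank (fail=3 > pending=2 > unknown=1 > pass=0,
-- # no valid bucket = -1), instead of separate any/all scans or boolean flags.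
-- _RANK = {"fail": 3, "cancel": 3, "pending": 2, "pass": 0, "skipping": 0}
--
-- def _classify_check_result(returncode, checks):
--     r = -1
--     for check in checks:
--         b = check.get("bucket", "")
--         if b:
--             r = max(r, _RANK.get(b.lower(), 1))
--     if r >= 3:
--         return "failed"
--     if r <= 0 and checks:
--         return "passed"
--     if r == 2:
--         return "pending"
--     return {0: "passed", 1: "failed"}.get(returncode, "pending")
-- ===== Notes on version B (the rewrite author's own statement) =====
-- stated objective: alternative
-- what changed: Replaced A's buckets list plus three separate any/all scans by a max-reduction over a numeric severity lattice (fail=3, pending=2, unknown=1, pass=0, none=-1): one fold computes the maximum rank and the verdict is read off that single number, with the returncode fallback as a dict lookup.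
import Mathlib
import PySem

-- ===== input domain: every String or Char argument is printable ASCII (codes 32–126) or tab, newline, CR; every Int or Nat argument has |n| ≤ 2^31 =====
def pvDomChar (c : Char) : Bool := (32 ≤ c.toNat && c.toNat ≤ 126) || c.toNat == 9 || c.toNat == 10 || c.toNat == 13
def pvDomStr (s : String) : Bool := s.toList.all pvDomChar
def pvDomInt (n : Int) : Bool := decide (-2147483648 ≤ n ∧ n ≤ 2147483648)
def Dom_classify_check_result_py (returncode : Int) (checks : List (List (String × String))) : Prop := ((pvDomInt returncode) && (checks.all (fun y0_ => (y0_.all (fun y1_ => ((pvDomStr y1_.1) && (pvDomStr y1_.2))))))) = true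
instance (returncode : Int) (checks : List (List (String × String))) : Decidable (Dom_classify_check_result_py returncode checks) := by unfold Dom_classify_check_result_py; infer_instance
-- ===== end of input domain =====

-- B replaces A's buckets list and three any/all scans by a single max-reduction
-- over a numeric severity lattice (objective: alternative decomposition, same cost).

-- check.get("bucket", "") on a Python dict given as an assoc list
def pvGetBucket (check : List (String × String)) : String :=
  ((PySem.Dict.ofList check).get? "bucket").getD ""

-- ===== PORT A =====
def classify_check_result_py (returncode : Int) (checks : List (List (String × String))) : String :=
  let buckets := (checks.filter (fun c => pvGetBucket c ≠ "")).map
      (fun c => PySem.Str.lower (pvGetBucket c))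
  if buckets.any (fun b => b = "fail" ∨ b = "cancel") then "failed"
  else if checks ≠ [] ∧ buckets.all (fun b => b = "pass" ∨ b = "skipping") then "passed"
  else if buckets.any (fun b => b = "pending") then "pending"
  else if returncode = 0 then "passed"
  else if returncode = 1 then "failed"
  else "pending"

-- ===== PORT B =====
-- _RANK.get(b, 1) on the literal severity table
def pvRank (b : String) : Int :=
  ((PySem.Dict.ofList [("fail", (3:Int)), ("cancel", 3), ("pending", 2), ("pass", 0), ("skipping", 0)]).get? b).getD 1

def classify_check_result_py_alt (returncode : Int) (checks : List (List (String × String))) : String :=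
  let r := checks.foldl (fun r c =>
    let b := pvGetBucket c
    if b = "" then r else max r (pvRank (PySem.Str.lower b))) (-1)
  if r ≥ 3 then "failed"
  else if r ≤ 0 ∧ checks ≠ [] then "passed"
  else if r = 2 then "pending"
  else ((PySem.Dict.ofList [((0:Int), "passed"), ((1:Int), "failed")]).get? returncode).getD "pending"

-- ===== PRECONDITION & SPEC =====
def Spec_classify_check_result_py (returncode : Int) (checks : List (List (String × String))) (out : String) : Prop := out = classify_check_result_py_alt returncode checks
instance (returncode : Int) (checks : List (List (String × String))) (out : String) : Decidable (Spec_classify_check_result_py returncode checks out) := by unfold Spec_classify_check_result_py; infer_instance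

-- ===== CLAIM (what is proved, stated in full; the proofs are below) =====
def Claim_equal_classify_check_result_py : Prop := ∀ (returncode : Int) (checks : List (List (String × String))), Dom_classify_check_result_py returncode checks → Spec_classify_check_result_py returncode checks (classify_check_result_py returncode checks)

-- ===== LEMMAS AND PROOFS =====
def pvBuckets (checks : List (List (String × String))) : List String :=
  (checks.filter (fun c => pvGetBucket c ≠ "")).map (fun c => PySem.Str.lower (pvGetBucket c))

def pvStepR (r : Int) (b : String) : Int := max r (pvRank b)

theorem pvFold_bridge (checks : List (List (String × String))) (s : Int) :
    checks.foldl (fun r c =>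
      let b := pvGetBucket c
      if b = "" then r else max r (pvRank (PySem.Str.lower b))) s
    = (pvBuckets checks).foldl pvStepR s := by
  induction checks generalizing s with
  | nil => simp [pvBuckets]
  | cons c cs ih =>
    by_cases h : pvGetBucket c = "" <;> simp [pvBuckets, pvStepR, h, ih]

theorem pvRank_unknown (b : String) (h1 : ¬b = "fail") (h2 : ¬b = "cancel")
    (h3 : ¬b = "pending") (h4 : ¬b = "pass") (h5 : ¬b = "skipping") : pvRank b = 1 := by
  simp [pvRank, PySem.Dict.ofList, PySem.Dict.update, PySem.Dict.empty, PySem.Dict.insert,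
    PySem.Dict.get?, PySem.Dict.contains, beq_iff_eq,
    Ne.symm h1, Ne.symm h2, Ne.symm h3, Ne.symm h4, Ne.symm h5]

theorem pvRank_ge3 (b : String) : (3 ≤ pvRank b) ↔ (b = "fail" ∨ b = "cancel") := by
  by_cases h1 : b = "fail"; · subst h1; decide
  by_cases h2 : b = "cancel"; · subst h2; decide
  by_cases h3 : b = "pending"; · subst h3; decide
  by_cases h4 : b = "pass"; · subst h4; decide
  by_cases h5 : b = "skipping"; · subst h5; decide
  rw [pvRank_unknown b h1 h2 h3 h4 h5]
  simp [h1, h2]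

theorem pvRank_le0 (b : String) : (pvRank b ≤ 0) ↔ (b = "pass" ∨ b = "skipping") := by
  by_cases h1 : b = "fail"; · subst h1; decide
  by_cases h2 : b = "cancel"; · subst h2; decide
  by_cases h3 : b = "pending"; · subst h3; decide
  by_cases h4 : b = "pass"; · subst h4; decide
  by_cases h5 : b = "skipping"; · subst h5; decide
  rw [pvRank_unknown b h1 h2 h3 h4 h5]
  simp [h4, h5]

theorem pvRank_ge2 (b : String) :
    (2 ≤ pvRank b) ↔ (b = "fail" ∨ b = "cancel" ∨ b = "pending") := by
  by_cases h1 : b = "fail"; · subst h1; decide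
  by_cases h2 : b = "cancel"; · subst h2; decide
  by_cases h3 : b = "pending"; · subst h3; decide
  by_cases h4 : b = "pass"; · subst h4; decide
  by_cases h5 : b = "skipping"; · subst h5; decide
  rw [pvRank_unknown b h1 h2 h3 h4 h5]
  simp [h1, h2, h3]

theorem pvRank_le3 (b : String) : pvRank b ≤ 3 := by
  by_cases h1 : b = "fail"; · subst h1; decide
  by_cases h2 : b = "cancel"; · subst h2; decide
  by_cases h3 : b = "pending"; · subst h3; decide
  by_cases h4 : b = "pass"; · subst h4; decide
  by_cases h5 : b = "skipping"; · subst h5; decide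
  rw [pvRank_unknown b h1 h2 h3 h4 h5]; omega

theorem pvFoldR_ge3 (L : List String) (s : Int) :
    (3 ≤ L.foldl pvStepR s) ↔ (3 ≤ s ∨ L.any (fun b => b = "fail" ∨ b = "cancel")) := by
  induction L generalizing s with
  | nil => simp
  | cons b L ih =>
    simp only [List.foldl_cons, ih, pvStepR, List.any_cons, le_max_iff,
      Bool.or_eq_true, decide_eq_true_eq, pvRank_ge3]
    tauto

theorem pvFoldR_le0 (L : List String) (s : Int) :
    (L.foldl pvStepR s ≤ 0) ↔ (s ≤ 0 ∧ L.all (fun b => b = "pass" ∨ b = "skipping")) := by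
  induction L generalizing s with
  | nil => simp
  | cons b L ih =>
    simp only [List.foldl_cons, ih, pvStepR, List.all_cons, max_le_iff,
      Bool.and_eq_true, decide_eq_true_eq, pvRank_le0]
    tauto

theorem pvFoldR_ge2 (L : List String) (s : Int) :
    (2 ≤ L.foldl pvStepR s) ↔
      (2 ≤ s ∨ L.any (fun b => b = "fail" ∨ b = "cancel" ∨ b = "pending")) := by
  induction L generalizing s with
  | nil => simp
  | cons b L ih =>
    simp only [List.foldl_cons, ih, pvStepR, List.any_cons, le_max_iff,
      Bool.or_eq_true, decide_eq_true_eq, pvRank_ge2]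
    tauto

theorem pvFoldR_le3 (L : List String) (s : Int) (hs : s ≤ 3) :
    L.foldl pvStepR s ≤ 3 := by
  induction L generalizing s with
  | nil => exact hs
  | cons b L ih => exact ih _ (max_le hs (pvRank_le3 b))

-- the common returncode fallback: if-chain (A) = dict lookup (B)
theorem pvFallback_eq (rc : Int) :
    (if rc = 0 then "passed" else if rc = 1 then "failed" else "pending")
    = ((PySem.Dict.ofList [((0:Int), "passed"), ((1:Int), "failed")]).get? rc).getD "pending" := by
  by_cases h0 : rc = 0; · subst h0; decide
  by_cases h1 : rc = 1; · subst h1; decide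
  simp [PySem.Dict.ofList, PySem.Dict.update, PySem.Dict.empty, PySem.Dict.insert,
    PySem.Dict.get?, PySem.Dict.contains, beq_iff_eq, h0, h1, Ne.symm h0, Ne.symm h1]

-- ===== VERDICT (by name: the statement is the Claim_ definition above) =====
theorem classify_check_result_py_spec : Claim_equal_classify_check_result_py := by
  intro returncode checks _
  show classify_check_result_py returncode checks = classify_check_result_py_alt returncode checks
  have hA : classify_check_result_py returncode checks =
      (if (pvBuckets checks).any (fun b => b = "fail" ∨ b = "cancel") then "failed"
       else if checks ≠ [] ∧ (pvBuckets checks).all (fun b => b = "pass" ∨ b = "skipping") then "passed"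
       else if (pvBuckets checks).any (fun b => b = "pending") then "pending"
       else if returncode = 0 then "passed"
       else if returncode = 1 then "failed"
       else "pending") := rfl
  have hB : classify_check_result_py_alt returncode checks =
      (if (pvBuckets checks).foldl pvStepR (-1) ≥ 3 then "failed"
       else if (pvBuckets checks).foldl pvStepR (-1) ≤ 0 ∧ checks ≠ [] then "passed"
       else if (pvBuckets checks).foldl pvStepR (-1) = 2 then "pending"
       else ((PySem.Dict.ofList [((0:Int), "passed"), ((1:Int), "failed")]).get? returncode).getD "pending") := by
    rw [classify_check_result_py_alt]
    rw [pvFold_bridge]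
  rw [hA, hB]
  set L := pvBuckets checks with hL
  set R := L.foldl pvStepR (-1) with hR
  by_cases hf : (L.any (fun b => b = "fail" ∨ b = "cancel")) = true
  · have h3 : R ≥ 3 := (pvFoldR_ge3 L (-1)).mpr (Or.inr hf)
    rw [if_pos hf, if_pos h3]
  · have hn3 : ¬ (R ≥ 3) := by
      intro h
      rcases (pvFoldR_ge3 L (-1)).mp h with h | h
      · omega
      · exact hf h
    rw [if_neg hf, if_neg hn3]
    by_cases hp : (L.all (fun b => b = "pass" ∨ b = "skipping")) = true
    · have h0 : R ≤ 0 := (pvFoldR_le0 L (-1)).mpr ⟨by omega, hp⟩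
      by_cases hc : checks = []
      · have hLnil : L = [] := by rw [hL, hc]; rfl
        have hRneg : R = -1 := by rw [hR, hLnil]; rfl
        have e1 : ¬ (checks ≠ [] ∧ (L.all (fun b => b = "pass" ∨ b = "skipping")) = true) :=
          fun h => h.1 hc
        have e2 : ¬ ((L.any (fun b => b = "pending")) = true) := by rw [hLnil]; simp
        have e3 : ¬ (R ≤ 0 ∧ checks ≠ []) := fun h => h.2 hc
        have e4 : ¬ (R = 2) := by omega
        rw [if_neg e1, if_neg e2, if_neg e3, if_neg e4]
        exact pvFallback_eq returncode
      · have e1 : checks ≠ [] ∧ (L.all (fun b => b = "pass" ∨ b = "skipping")) = true := ⟨hc, hp⟩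
        have e2 : R ≤ 0 ∧ checks ≠ [] := ⟨h0, hc⟩
        rw [if_pos e1, if_pos e2]
    · have hn0 : ¬ (R ≤ 0) := fun h => hp ((pvFoldR_le0 L (-1)).mp h).2
      have e1 : ¬ (checks ≠ [] ∧ (L.all (fun b => b = "pass" ∨ b = "skipping")) = true) :=
        fun h => hp h.2
      have e2 : ¬ (R ≤ 0 ∧ checks ≠ []) := fun h => hn0 h.1
      rw [if_neg e1, if_neg e2]
      by_cases hpd : (L.any (fun b => b = "pending")) = true
      · have h2 : 2 ≤ R := by
          refine (pvFoldR_ge2 L (-1)).mpr (Or.inr ?_)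
          simp only [List.any_eq_true, decide_eq_true_eq] at hpd ⊢
          rcases hpd with ⟨b, hb, hbp⟩
          exact ⟨b, hb, Or.inr (Or.inr hbp)⟩
        have hR3 : R ≤ 3 := pvFoldR_le3 L (-1) (by omega)
        rw [if_pos hpd, if_pos (by omega : R = 2)]
      · have h2 : ¬ (R = 2) := by
          intro h
          rcases (pvFoldR_ge2 L (-1)).mp (by omega) with hh | hh
          · omega
          · simp only [List.any_eq_true, decide_eq_true_eq] at hf hpd hh
            rcases hh with ⟨b, hb, hb1 | hb1 | hb1⟩
            · exact hf ⟨b, hb, Or.inl hb1⟩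
            · exact hf ⟨b, hb, Or.inr hb1⟩
            · exact hpd ⟨b, hb, hb1⟩
        rw [if_neg hpd, if_neg h2]
        exact pvFallback_eq returncode
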